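-- pv_equiv track=rewrite | github.com/sandialabs/LoQS | loqs/tools/qectools.py | compose_pstr_lists
-- ===== SOURCE A (Python) =====
-- from collections.abc import Sequence
--
-- def compose_pstrs(pstr1: str, pstr2: str) -> str:
--     """Multiply two Pauli strings.
--
--     Among other uses, it can be used to apply Pauli string
--     corrections to a frame. Mathematically, it is the same
--     as (PauliFrame.update_from_pauli_str)[api:PauliFrame.update_from_pauli_str], but without
--     requiring one of the Pauli strings to be wrapped up in
--     a (PauliFrame)[api:PauliFrame].
--
--     Parameters
--     ----------
--     pstr1 : str
--         First Pauli string
--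
--     pstr2 : str
--         Second Pauli string
--
--     Returns
--     -------
--     str
--         Product of the two Pauli strings
--
--     REVIEW_SPHINX_REFERENCE
--     """
--     assert len(pstr1) == len(pstr2)
--     assert all([c in "IXYZ" for c in pstr1])
--     assert all([c in "IXYZ" for c in pstr2])
--
--     composed = ""
--     for p1, p2 in zip(pstr1, pstr2):
--         if p1 == p2:
--             composed += "I"
--         elif set((p1, p2)) in [set("YZ"), set("IX")]:
--             composed += "X"
--         elif set((p1, p2)) in [set("XZ"), set("IY")]:
--             composed += "Y"
--         else:
--             composed += "Z"
--
--     return composed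
--
-- def compose_pstr_lists(
--     pstr_list1: Sequence[str], pstr_list2: Sequence[str]
-- ) -> list[str]:
--     """Perform (compose_pstrs)[api:compose_pstrs] on two sets of Pauli strings.
--
--     Parameters
--     ----------
--     pstr_list1 : Sequence[str]
--         First set of Pauli strings
--
--     pstr_list2 : Sequence[str]
--         Second set of Pauli strings
--
--     Returns
--     -------
--     list[str]
--         A list of Pauli products between every string in the first
--         set with every string in the second set
--
--     REVIEW_SPHINX_REFERENCE
--     """
--     composed_pstrs = []
--     for pstr1 in pstr_list1:
--         for pstr2 in pstr_list2:
--             composed_pstrs.append(compose_pstrs(pstr1, pstr2))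
--
--     return composed_pstrs
-- ===== SOURCE B (Python) =====
-- def _encode(p):
--     x = z = 0
--     for c in p:
--         x = 2 * x + (c in "XY")
--         z = 2 * z + (c in "ZY")
--     return x, z
--
--
-- def _decode(x, z, n):
--     if n == 0:
--         return ""
--     return _decode(x >> 1, z >> 1, n - 1) + "IZXY"[2 * (x & 1) + (z & 1)]
--
--
-- def compose_pstr_lists(pstr_list1, pstr_list2):
--     if not pstr_list1 or not pstr_list2:
--         return []
--     for p in pstr_list1:
--         assert all(c in "IXYZ" for c in p)
--     for p in pstr_list2:
--         assert all(c in "IXYZ" for c in p)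
--     n = len(pstr_list1[0])
--     for p in pstr_list1:
--         assert len(p) == n
--     for p in pstr_list2:
--         assert len(p) == n
--     enc1 = [_encode(p) for p in pstr_list1]
--     enc2 = [_encode(p) for p in pstr_list2]
--     return [_decode(x1 ^ x2, z1 ^ z2, n) for x1, z1 in enc1 for x2, z2 in enc2]
-- ===== Notes on version B (the rewrite author's own statement) =====
-- stated objective: alternative
-- what changed: Each string is encoded ONCE into a pair of integer symplectic bitmasks (X-mask, Z-mask), hoisted out of the pair loop; each pairwise product is then two whole-string integer XORs followed by a decode pass, instead of A's per-pair per-character set-membership branch chain; B keeps A's validation as upfront asserts guarded by nonemptiness so it raises exactly where A does.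
import Mathlib
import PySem

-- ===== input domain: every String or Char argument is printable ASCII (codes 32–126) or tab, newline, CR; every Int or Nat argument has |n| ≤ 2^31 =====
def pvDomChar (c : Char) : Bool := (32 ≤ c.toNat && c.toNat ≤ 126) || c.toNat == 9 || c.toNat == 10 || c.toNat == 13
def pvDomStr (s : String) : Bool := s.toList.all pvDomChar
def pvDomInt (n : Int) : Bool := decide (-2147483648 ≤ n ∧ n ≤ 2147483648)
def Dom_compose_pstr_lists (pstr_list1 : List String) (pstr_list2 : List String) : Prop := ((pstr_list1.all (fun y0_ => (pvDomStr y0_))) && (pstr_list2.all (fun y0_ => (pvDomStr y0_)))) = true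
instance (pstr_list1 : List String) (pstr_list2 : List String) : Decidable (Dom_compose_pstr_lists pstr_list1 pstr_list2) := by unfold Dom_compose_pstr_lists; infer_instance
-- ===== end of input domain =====

-- B encodes every string once into two integer symplectic bitmasks, forms each pairwise
-- product as two whole-string XORs, and decodes; equivalence is about the RETURN value
-- on the inputs where A's asserts pass (alternative algorithm; no speed claim).

-- ===== PORT A =====
-- set((p1, p2)) == set("ab"): mutual containment of the two two-element sets
def pvSetEq2 (c1 c2 a b : Char) : Bool :=
  ([c1, c2].all (fun c => c == a || c == b)) && ([a, b].all (fun c => c == c1 || c == c2))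

-- the three asserts of A are the precondition Pre_ below (AssertionError = raise)
def compose_pstrs (pstr1 : String) (pstr2 : String) : String :=
  String.ofList ((pstr1.toList.zip pstr2.toList).foldl (fun composed pr =>
      if pr.1 = pr.2 then composed ++ ['I']
      else if pvSetEq2 pr.1 pr.2 'Y' 'Z' || pvSetEq2 pr.1 pr.2 'I' 'X' then composed ++ ['X']
      else if pvSetEq2 pr.1 pr.2 'X' 'Z' || pvSetEq2 pr.1 pr.2 'I' 'Y' then composed ++ ['Y']
      else composed ++ ['Z']) [])

def compose_pstr_lists (pstr_list1 : List String) (pstr_list2 : List String) : List String :=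
  pstr_list1.foldl (fun acc pstr1 =>
    pstr_list2.foldl (fun acc2 pstr2 => acc2 ++ [compose_pstrs pstr1 pstr2]) acc) []

-- ===== PORT B =====
-- _encode: left fold accumulating the X- and Z-bitmasks (c in "XY" / c in "ZY" as 0/1)
def pv_encode (p : String) : Nat × Nat :=
  p.toList.foldl (fun (xz : Nat × Nat) c =>
    (2 * xz.1 + (if c = 'X' ∨ c = 'Y' then 1 else 0),
     2 * xz.2 + (if c = 'Z' ∨ c = 'Y' then 1 else 0))) (0, 0)

-- _decode: recursion on n; "IZXY"[k] with k = 2*(x&1)+(z&1) < 4 always in range, so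
-- Python's indexing never raises and getD is exact here
def pv_decode (x z : Nat) (n : Nat) : List Char :=
  match n with
  | 0 => []
  | n + 1 => pv_decode (x >>> 1) (z >>> 1) n ++
      [(['I', 'Z', 'X', 'Y'].getD (2 * (x &&& 1) + (z &&& 1)) 'I')]

-- the asserts of Source B are the same precondition Pre_ below (AssertionError = raise);
-- pstr_list1[0] is read under the nonemptiness guard, so headD is exact
def compose_pstr_lists_alt (pstr_list1 : List String) (pstr_list2 : List String) : List String :=
  if pstr_list1 = [] ∨ pstr_list2 = [] then []
  else
    let n := (pstr_list1.headD "").toList.length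
    let enc1 := pstr_list1.map (fun p => pv_encode p)
    let enc2 := pstr_list2.map (fun p => pv_encode p)
    enc1.flatMap (fun a => enc2.map (fun b =>
      String.ofList (pv_decode (a.1 ^^^ b.1) (a.2 ^^^ b.2) n)))

-- ===== PRECONDITION & SPEC =====
-- Exactly where A returns: for every pair reached by the nested loops the two strings
-- have equal length and consist of I/X/Y/Z only (otherwise an assert raises AssertionError).
def Pre_compose_pstr_lists (pstr_list1 : List String) (pstr_list2 : List String) : Prop :=
  ∀ s1 ∈ pstr_list1, ∀ s2 ∈ pstr_list2,
    s1.toList.length = s2.toList.length ∧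
    (s1.toList.all (fun c => c ∈ ['I', 'X', 'Y', 'Z'])) = true ∧
    (s2.toList.all (fun c => c ∈ ['I', 'X', 'Y', 'Z'])) = true
instance (pstr_list1 : List String) (pstr_list2 : List String) : Decidable (Pre_compose_pstr_lists pstr_list1 pstr_list2) := by unfold Pre_compose_pstr_lists; infer_instance
def pvWitness_compose_pstr_lists : List String × List String := (["XY", "IZ"], ["YY"])

def Spec_compose_pstr_lists (pstr_list1 : List String) (pstr_list2 : List String) (out : List String) : Prop := out = compose_pstr_lists_alt pstr_list1 pstr_list2
instance (pstr_list1 : List String) (pstr_list2 : List String) (out : List String) : Decidable (Spec_compose_pstr_lists pstr_list1 pstr_list2 out) := by unfold Spec_compose_pstr_lists; infer_instance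

-- ===== CLAIM (what is proved, stated in full; the proofs are below) =====
def Claim_equal_compose_pstr_lists : Prop := ∀ (pstr_list1 : List String) (pstr_list2 : List String), Dom_compose_pstr_lists pstr_list1 pstr_list2 → Pre_compose_pstr_lists pstr_list1 pstr_list2 → Spec_compose_pstr_lists pstr_list1 pstr_list2 (compose_pstr_lists pstr_list1 pstr_list2)

-- ===== LEMMAS AND PROOFS =====

-- the per-position character A appends
def pvCharA (c1 c2 : Char) : Char :=
  if c1 = c2 then 'I'
  else if pvSetEq2 c1 c2 'Y' 'Z' || pvSetEq2 c1 c2 'I' 'X' then 'X'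
  else if pvSetEq2 c1 c2 'X' 'Z' || pvSetEq2 c1 c2 'I' 'Y' then 'Y'
  else 'Z'

def pvBx (c : Char) : Nat := if c = 'X' ∨ c = 'Y' then 1 else 0
def pvBz (c : Char) : Nat := if c = 'Z' ∨ c = 'Y' then 1 else 0

-- XOR splits over appending one low bit
lemma pv_xor_bit (x y e f : Nat) (he : e ≤ 1) (hf : f ≤ 1) :
    (2 * x + e) ^^^ (2 * y + f) = 2 * (x ^^^ y) + (e ^^^ f) := by
  interval_cases e <;> interval_cases f <;>
    [have h := Nat.xor_bit false x false y;
     have h := Nat.xor_bit false x true y;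
     have h := Nat.xor_bit true x false y;
     have h := Nat.xor_bit true x true y] <;>
    simp [Nat.bit, Nat.two_mul] at h <;> simp [Nat.two_mul] <;> omega

lemma pv_encode_append (l : List Char) (c : Char) :
    (l ++ [c]).foldl (fun (xz : Nat × Nat) c =>
      (2 * xz.1 + (if c = 'X' ∨ c = 'Y' then 1 else 0),
       2 * xz.2 + (if c = 'Z' ∨ c = 'Y' then 1 else 0))) (0, 0)
    = (2 * (pv_encode (String.ofList l)).1 + pvBx c,
       2 * (pv_encode (String.ofList l)).2 + pvBz c) := by
  simp [pv_encode, List.foldl_append, pvBx, pvBz]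

lemma pv_bx_le (c : Char) : pvBx c ≤ 1 := by unfold pvBx; split <;> omega
lemma pv_bz_le (c : Char) : pvBz c ≤ 1 := by unfold pvBz; split <;> omega

-- the 16 valid character pairs
lemma pv_char_eq (c1 c2 : Char)
    (h1 : c1 ∈ (['I', 'X', 'Y', 'Z'] : List Char)) (h2 : c2 ∈ (['I', 'X', 'Y', 'Z'] : List Char)) :
    pvCharA c1 c2 = (['I', 'Z', 'X', 'Y'].getD (2 * (pvBx c1 ^^^ pvBx c2) + (pvBz c1 ^^^ pvBz c2)) 'I') := by
  fin_cases h1 <;> fin_cases h2 <;> decide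

-- core: the character-level map equals decode of the XORed encodings
lemma pv_map_eq_decode (a b : List Char) (hlen : a.length = b.length)
    (h1 : (a.all (fun c => c ∈ ['I', 'X', 'Y', 'Z'])) = true)
    (h2 : (b.all (fun c => c ∈ ['I', 'X', 'Y', 'Z'])) = true) :
    (a.zip b).map (fun pr => pvCharA pr.1 pr.2)
      = pv_decode ((pv_encode (String.ofList a)).1 ^^^ (pv_encode (String.ofList b)).1)
                  ((pv_encode (String.ofList a)).2 ^^^ (pv_encode (String.ofList b)).2)
                  a.length := by
  induction b using List.reverseRecOn generalizing a with
  | nil =>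
    have : a = [] := List.eq_nil_of_length_eq_zero (by simpa using hlen)
    subst this; simp [pv_decode]
  | append_singleton b' d ih =>
    rcases a.eq_nil_or_concat with rfl | ⟨a', c, rfl⟩
    · simp at hlen
    · simp only [List.concat_eq_append] at *
      have hlen' : a'.length = b'.length := by simpa using hlen
      simp only [List.all_append, Bool.and_eq_true, List.all_cons, List.all_nil] at h1 h2
      have hx := pv_encode_append a' c
      have hxb := pv_encode_append b' d
      have hxor1 := pv_xor_bit (pv_encode (String.ofList a')).1 (pv_encode (String.ofList b')).1
        (pvBx c) (pvBx d) (pv_bx_le c) (pv_bx_le d)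
      have hxor2 := pv_xor_bit (pv_encode (String.ofList a')).2 (pv_encode (String.ofList b')).2
        (pvBz c) (pvBz d) (pv_bz_le c) (pv_bz_le d)
      have hexy : pvBx c ^^^ pvBx d ≤ 1 := by
        have := pv_bx_le c; have := pv_bx_le d
        interval_cases (pvBx c) <;> interval_cases (pvBx d) <;> decide
      have hezy : pvBz c ^^^ pvBz d ≤ 1 := by
        have := pv_bz_le c; have := pv_bz_le d
        interval_cases (pvBz c) <;> interval_cases (pvBz d) <;> decide
      have hzip : (a' ++ [c]).zip (b' ++ [d]) = a'.zip b' ++ [(c, d)] :=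
        List.zip_append hlen'
      have hlena : (a' ++ [c]).length = a'.length + 1 := by simp
      rw [hzip, List.map_append, hlena]
      show _ = pv_decode _ _ (a'.length + 1)
      unfold pv_encode
      rw [show (String.ofList (a' ++ [c])).toList = a' ++ [c] by simp,
          show (String.ofList (b' ++ [d])).toList = b' ++ [d] by simp]
      rw [show ((a' ++ [c]).foldl (fun (xz : Nat × Nat) c =>
            (2 * xz.1 + (if c = 'X' ∨ c = 'Y' then 1 else 0),
             2 * xz.2 + (if c = 'Z' ∨ c = 'Y' then 1 else 0))) (0, 0)) = _ from pv_encode_append a' c]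
      rw [show ((b' ++ [d]).foldl (fun (xz : Nat × Nat) c =>
            (2 * xz.1 + (if c = 'X' ∨ c = 'Y' then 1 else 0),
             2 * xz.2 + (if c = 'Z' ∨ c = 'Y' then 1 else 0))) (0, 0)) = _ from pv_encode_append b' d]
      simp only [pv_decode]
      rw [hxor1, hxor2]
      have hdivx : (2 * ((pv_encode (String.ofList a')).1 ^^^ (pv_encode (String.ofList b')).1)
          + (pvBx c ^^^ pvBx d)) >>> 1
          = (pv_encode (String.ofList a')).1 ^^^ (pv_encode (String.ofList b')).1 := by
        rw [Nat.shiftRight_one]; omega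
      have hdivz : (2 * ((pv_encode (String.ofList a')).2 ^^^ (pv_encode (String.ofList b')).2)
          + (pvBz c ^^^ pvBz d)) >>> 1
          = (pv_encode (String.ofList a')).2 ^^^ (pv_encode (String.ofList b')).2 := by
        rw [Nat.shiftRight_one]; omega
      have hmodx : (2 * ((pv_encode (String.ofList a')).1 ^^^ (pv_encode (String.ofList b')).1)
          + (pvBx c ^^^ pvBx d)) &&& 1 = pvBx c ^^^ pvBx d := by
        rw [Nat.and_one_is_mod]; omega
      have hmodz : (2 * ((pv_encode (String.ofList a')).2 ^^^ (pv_encode (String.ofList b')).2)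
          + (pvBz c ^^^ pvBz d)) &&& 1 = pvBz c ^^^ pvBz d := by
        rw [Nat.and_one_is_mod]; omega
      rw [hdivx, hdivz, hmodx, hmodz, ih a' hlen' h1.1 h2.1]
      simpa [List.getD] using pv_char_eq c d (by simpa using h1.2.1) (by simpa using h2.2.1)

-- per-string agreement under the asserts
lemma pv_pstrs_eq (p1 p2 : String)
    (hlen : p1.toList.length = p2.toList.length)
    (h1 : (p1.toList.all (fun c => c ∈ ['I', 'X', 'Y', 'Z'])) = true)
    (h2 : (p2.toList.all (fun c => c ∈ ['I', 'X', 'Y', 'Z'])) = true) :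
    compose_pstrs p1 p2
      = String.ofList (pv_decode ((pv_encode p1).1 ^^^ (pv_encode p2).1)
          ((pv_encode p1).2 ^^^ (pv_encode p2).2) p1.toList.length) := by
  unfold compose_pstrs
  have hfold : (p1.toList.zip p2.toList).foldl (fun composed pr =>
      if pr.1 = pr.2 then composed ++ ['I']
      else if pvSetEq2 pr.1 pr.2 'Y' 'Z' || pvSetEq2 pr.1 pr.2 'I' 'X' then composed ++ ['X']
      else if pvSetEq2 pr.1 pr.2 'X' 'Z' || pvSetEq2 pr.1 pr.2 'I' 'Y' then composed ++ ['Y']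
      else composed ++ ['Z']) []
      = (p1.toList.zip p2.toList).foldl (fun composed pr => composed ++ [pvCharA pr.1 pr.2]) [] := by
    apply PySem.List.foldl_congr_mem
    intro acc pr _
    simp only [pvCharA, ← apply_ite (fun ch : Char => acc ++ [ch])]
  rw [hfold, PySem.List.foldl_append_singleton_eq_map]
  rw [pv_map_eq_decode p1.toList p2.toList hlen h1 h2]
  congr 1 <;> simp [pv_encode]

-- ===== VERDICT (by name: the statement is the Claim_ definition above) =====
theorem compose_pstr_lists_spec : Claim_equal_compose_pstr_lists := by
  intro l1 l2 _hdom hpre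
  unfold Spec_compose_pstr_lists compose_pstr_lists compose_pstr_lists_alt
  by_cases hemp : l1 = [] ∨ l2 = []
  · rw [if_pos hemp]
    rcases hemp with rfl | rfl
    · simp
    · simp
  · rw [if_neg hemp]
    push_neg at hemp
    obtain ⟨h1ne, h2ne⟩ := hemp
    obtain ⟨p0, l1', rfl⟩ := List.exists_cons_of_ne_nil h1ne
    obtain ⟨q0, l2', rfl⟩ := List.exists_cons_of_ne_nil h2ne
    set l1 := p0 :: l1' with hl1
    set l2 := q0 :: l2' with hl2
    have hn : ∀ p1 ∈ l1, p1.toList.length = (l1.headD "").toList.length := by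
      intro p1 hp1
      have h1 := (hpre p1 hp1 q0 (by simp [hl2])).1
      have h2 := (hpre p0 (by simp [hl1]) q0 (by simp [hl2])).1
      simp only [hl1, List.headD_cons]
      omega
    have houter : l1.foldl (fun acc pstr1 =>
      l2.foldl (fun acc2 pstr2 => acc2 ++ [compose_pstrs pstr1 pstr2]) acc) []
        = l1.foldl (fun acc pstr1 => acc ++ l2.map (fun pstr2 =>
            String.ofList (pv_decode ((pv_encode pstr1).1 ^^^ (pv_encode pstr2).1)
              ((pv_encode pstr1).2 ^^^ (pv_encode pstr2).2)
              (l1.headD "").toList.length))) [] := by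
      apply PySem.List.foldl_congr_mem
      intro acc p1 hp1
      have hinner : l2.foldl (fun acc2 pstr2 => acc2 ++ [compose_pstrs p1 pstr2]) acc
          = l2.foldl (fun acc2 pstr2 => acc2 ++ [String.ofList
              (pv_decode ((pv_encode p1).1 ^^^ (pv_encode pstr2).1)
                ((pv_encode p1).2 ^^^ (pv_encode pstr2).2)
                (l1.headD "").toList.length)]) acc := by
        apply PySem.List.foldl_congr_mem
        intro acc2 p2 hp2
        obtain ⟨hlen, hv1, hv2⟩ := hpre p1 hp1 p2 hp2
        rw [pv_pstrs_eq p1 p2 hlen hv1 hv2, hn p1 hp1]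
      rw [hinner, PySem.List.foldl_append_singleton_eq_map]
    rw [houter, PySem.List.foldl_append_eq_flatMap]
    simp only [List.flatMap_map, List.map_map, Function.comp_def, List.nil_append]
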